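-- pv_equiv track=rewrite | github.com/PilotsTradeNetwork/ModBot | ptn/modbot/modules/Helpers.py | edit_warning_reason
-- ===== SOURCE A (Python) =====
-- def edit_warning_reason(reason, new_reason):
--     """
--     Edits the warning reason in a structured message infraction.
--
--     :param str message_infraction: The original message containing the infraction details.
--     :param str new_reason: The new reason to replace the old one.
--     :returns: The updated message infraction string.
--     """
--
--     # Split the message by lines
--     lines = reason.split('\n')
--     for i, line in enumerate(lines):
--         # Check if the line contains the warning reason
--         if line.startswith('**Warning Reason from Mod:**'):
--             # Replace the line with the new reason
--             lines[i] = f'**Warning Reason from Mod:** {new_reason}'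
--             break  # Stop the loop after finding and replacing the line
--
--     # Join the lines back into a single string
--     updated_message_infraction = '\n'.join(lines)
--     return updated_message_infraction
-- ===== SOURCE B (Python) =====
-- def edit_warning_reason(reason, new_reason):
--     """
--     Edits the warning reason in a structured message infraction.
--     Works on the raw string: locate the first line starting with the marker
--     via find, then splice the replacement line between two slices.
--     """
--     prefix = '**Warning Reason from Mod:**'
--     if reason.startswith(prefix):
--         start = 0
--     else:
--         pos = reason.find('\n' + prefix)
--         if pos == -1:
--             return reason
--         start = pos + 1
--     end = reason.find('\n', start)
--     if end == -1:
--         end = len(reason)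
--     return reason[:start] + prefix + ' ' + new_reason + reason[end:]
-- ===== Notes on version B (the rewrite author's own statement) =====
-- stated objective: idiomatic
-- what changed: B drops the split/enumerate-loop/join pipeline: it finds the first line starting with the marker directly on the raw string (startswith / find of '\n'+prefix), finds the end of that line with find('\n', start), and splices the replacement between two slices.
import Mathlib
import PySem

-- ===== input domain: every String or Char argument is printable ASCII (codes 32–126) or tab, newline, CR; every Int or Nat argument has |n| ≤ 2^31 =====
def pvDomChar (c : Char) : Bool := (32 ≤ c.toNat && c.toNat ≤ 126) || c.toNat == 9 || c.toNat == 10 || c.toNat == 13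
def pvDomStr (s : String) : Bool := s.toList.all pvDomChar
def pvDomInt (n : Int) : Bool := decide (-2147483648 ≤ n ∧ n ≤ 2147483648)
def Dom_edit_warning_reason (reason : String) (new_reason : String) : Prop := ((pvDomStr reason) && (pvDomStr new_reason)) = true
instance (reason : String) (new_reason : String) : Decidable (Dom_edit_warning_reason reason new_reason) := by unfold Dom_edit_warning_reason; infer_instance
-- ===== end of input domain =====

-- B replaces A's split/loop/join pipeline by direct find/slice splicing on the raw string (idiomatic; same cost).

-- ===== PORT A =====
def pvMarkerA : List Char := "**Warning Reason from Mod:**".toList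

-- the for/enumerate loop with break: replace the first matching line, keep the rest untouched
def pvReplaceFirst (new : List Char) : List (List Char) → List (List Char)
  | [] => []
  | l :: rest =>
    if PySem.Chars.startswith l pvMarkerA then (pvMarkerA ++ ' ' :: new) :: rest
    else l :: pvReplaceFirst new rest

def edit_warning_reason (reason : String) (new_reason : String) : String :=
  let lines := PySem.Chars.splitOn reason.toList ['\n']
  String.ofList (PySem.Chars.join ['\n'] (pvReplaceFirst new_reason.toList lines))

-- ===== PORT B =====
def pvMarkerB : List Char := "**Warning Reason from Mod:**".toList

-- the shared tail of Source B after `start` is fixed: end = reason.find('\n', start) (len if -1),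
-- then reason[:start] + prefix + ' ' + new_reason + reason[end:]
def pvSpliceB (s new : List Char) (start : Int) : List Char :=
  let e := PySem.Chars.findFrom s ['\n'] start
  let e2 := if e = -1 then (s.length : Int) else e
  PySem.Chars.slice s none (some start) ++ pvMarkerB ++ ' ' :: new ++ PySem.Chars.slice s (some e2) none

def edit_warning_reason_alt (reason : String) (new_reason : String) : String :=
  let s := reason.toList
  if PySem.Chars.startswith s pvMarkerB then
    String.ofList (pvSpliceB s new_reason.toList 0)
  else
    let pos := PySem.Chars.find s ('\n' :: pvMarkerB)
    if pos = -1 then reason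
    else String.ofList (pvSpliceB s new_reason.toList (pos + 1))

-- ===== PRECONDITION & SPEC =====
def Spec_edit_warning_reason (reason : String) (new_reason : String) (out : String) : Prop := out = edit_warning_reason_alt reason new_reason
instance (reason : String) (new_reason : String) (out : String) : Decidable (Spec_edit_warning_reason reason new_reason out) := by unfold Spec_edit_warning_reason; infer_instance

-- ===== CLAIM (what is proved, stated in full; the proofs are below) =====
def Claim_equal_edit_warning_reason : Prop := ∀ (reason : String) (new_reason : String), Dom_edit_warning_reason reason new_reason → Spec_edit_warning_reason reason new_reason (edit_warning_reason reason new_reason)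

-- ===== LEMMAS AND PROOFS =====

-- list-level reading of B (proof-only helper)
def pvBcore (s new : List Char) : List Char :=
  if PySem.Chars.startswith s pvMarkerB then pvSpliceB s new 0
  else
    let pos := PySem.Chars.find s ('\n' :: pvMarkerB)
    if pos = -1 then s else pvSpliceB s new (pos + 1)

-- first-splitting of a string at '\n' (proof-only model of split('\n'))
def pvLines : List Char → List (List Char)
  | [] => [[]]
  | c :: t => if c = '\n' then [] :: pvLines t else (pvLines t).modifyHead (c :: ·)

lemma pvMarker_no_nl : '\n' ∉ pvMarkerA := by decide

lemma pvLines_ne_nil (s : List Char) : pvLines s ≠ [] := by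
  induction s with
  | nil => simp [pvLines]
  | cons c t ih =>
    simp only [pvLines]
    split_ifs
    · simp
    · cases hpv : pvLines t with
      | nil => exact absurd hpv ih
      | cons h tl => simp

lemma splitOn_go_eq (fuel : Nat) : ∀ (l cur : List Char) (acc : List (List Char)),
    l.length ≤ fuel →
    PySem.Chars.splitOn.go ['\n'] fuel l cur acc
      = acc.reverse ++ (pvLines l).modifyHead (cur.reverse ++ ·) := by
  induction fuel with
  | zero =>
    intro l cur acc h
    have : l = [] := List.eq_nil_of_length_eq_zero (Nat.le_zero.mp h)
    subst this
    simp [PySem.Chars.splitOn.go, pvLines]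
  | succ n ih =>
    intro l cur acc h
    cases l with
    | nil => simp [PySem.Chars.splitOn.go, pvLines]
    | cons c rest =>
      rw [PySem.Chars.splitOn.go]
      by_cases hc : c = '\n'
      · subst hc
        have hpre : List.isPrefixOf ['\n'] ('\n' :: rest) = true := by simp [List.isPrefixOf]
        rw [if_pos hpre]
        simp only [List.length_cons] at h
        rw [ih _ _ _ (by simp; omega)]
        simp only [pvLines, List.reverse_cons, List.reverse_nil, List.nil_append,
          List.length_singleton, List.drop_one,
          List.tail_cons, List.append_assoc, List.singleton_append]
        cases hpv : pvLines rest with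
        | nil => exact absurd hpv (pvLines_ne_nil rest)
        | cons x y => simp
      · have hpre : ¬ List.isPrefixOf ['\n'] (c :: rest) = true := by
          simp [List.isPrefixOf]; exact fun hh => hc hh.symm
        rw [if_neg hpre]
        simp only [List.length_cons] at h
        rw [ih _ _ _ (by omega)]
        simp only [pvLines, if_neg hc]
        cases hpv : pvLines rest with
        | nil => exact absurd hpv (pvLines_ne_nil rest)
        | cons x y => simp

lemma splitOn_eq_pvLines (s : List Char) :
    PySem.Chars.splitOn s ['\n'] = pvLines s := by
  rw [PySem.Chars.splitOn, splitOn_go_eq _ _ _ _ (by omega)]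
  cases hpv : pvLines s with
  | nil => exact absurd hpv (pvLines_ne_nil s)
  | cons x y => simp

lemma pvLines_no_nl {s : List Char} (h : '\n' ∉ s) : pvLines s = [s] := by
  induction s with
  | nil => rfl
  | cons c t ih =>
    simp only [List.mem_cons, not_or] at h
    have hc : ¬ c = '\n' := fun hh => h.1 hh.symm
    simp [pvLines, hc, ih h.2]

lemma pvLines_append {l : List Char} (t : List Char) (h : '\n' ∉ l) :
    pvLines (l ++ '\n' :: t) = l :: pvLines t := by
  induction l with
  | nil => simp [pvLines]
  | cons c cs ih =>
    simp only [List.mem_cons, not_or] at h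
    have hc : ¬ c = '\n' := fun hh => h.1 hh.symm
    simp [pvLines, hc, ih h.2]

lemma join_cons (x : List Char) {ys : List (List Char)} (h : ys ≠ []) :
    PySem.Chars.join ['\n'] (x :: ys) = x ++ '\n' :: PySem.Chars.join ['\n'] ys := by
  obtain ⟨y, ys', rfl⟩ := List.exists_cons_of_ne_nil h
  rw [PySem.Chars.join_cons_cons]; simp

lemma join_pvLines (s : List Char) : PySem.Chars.join ['\n'] (pvLines s) = s := by
  induction s with
  | nil => simp [pvLines, PySem.Chars.join_singleton]
  | cons c t ih =>
    by_cases hc : c = '\n'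
    · subst hc; rw [pvLines, if_pos rfl, join_cons _ (pvLines_ne_nil t), ih]; simp
    · rw [pvLines, if_neg hc]
      obtain ⟨h, tl, hht⟩ := List.exists_cons_of_ne_nil (pvLines_ne_nil t)
      rw [hht] at ih ⊢
      cases tl with
      | nil => simp [PySem.Chars.join_singleton] at ih ⊢; simp [ih]
      | cons y ys => 
        rw [List.modifyHead_cons, PySem.Chars.join_cons_cons] at *
        simp only [← ih]; simp

lemma exists_first_split {s : List Char} (h : '\n' ∈ s) :
    ∃ l t, s = l ++ '\n' :: t ∧ '\n' ∉ l := by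
  induction s with
  | nil => simp at h
  | cons c cs ih =>
    by_cases hc : c = '\n'
    · exact ⟨[], cs, by simp [hc], by simp⟩
    · have hcs : '\n' ∈ cs := by
        rcases List.mem_cons.mp h with h1 | h1
        · exact absurd h1.symm hc
        · exact h1
      obtain ⟨l, t, rfl, hl⟩ := ih hcs
      refine ⟨c :: l, t, by simp, ?_⟩
      simp only [List.mem_cons, not_or]
      exact ⟨fun hh => hc hh.symm, hl⟩

lemma find_no_nl {s : List Char} (h : '\n' ∉ s) : PySem.Chars.find s ['\n'] = -1 := by
  rw [PySem.Chars.find_eq_neg_one_iff, List.singleton_infix_iff]; exact h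

lemma not_prefix_nl_drop {l : List Char} (hl : '\n' ∉ l) {i : Nat} (hi : i < l.length)
    (u t : List Char) : ¬ ('\n' :: u) <+: List.drop i (l ++ '\n' :: t) := by
  intro hpre
  rw [List.drop_append_of_le_length (le_of_lt hi),
    List.drop_eq_getElem_cons hi] at hpre
  obtain ⟨heq, -⟩ := (List.cons_prefix_cons).mp hpre
  exact hl (heq ▸ List.getElem_mem hi)

lemma find_eq_of_first {s sub : List Char} {k : Nat}
    (h1 : sub <+: List.drop k s) (h2 : ∀ i < k, ¬ sub <+: List.drop i s) :
    PySem.Chars.find s sub = (k : Int) := by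
  have hin : sub <:+: s := by
    obtain ⟨r, hr⟩ := h1
    exact ⟨List.take k s, r, by rw [List.append_assoc, hr, List.take_append_drop]⟩
  have hne : PySem.Chars.find s sub ≠ -1 := (PySem.Chars.find_ne_neg_one_iff s sub).mpr hin
  have hnn : 0 ≤ PySem.Chars.find s sub := (PySem.Chars.find_nonneg_iff s sub).mpr hin
  obtain ⟨hj1, hj2⟩ := PySem.Chars.find_spec hnn
  set j := (PySem.Chars.find s sub).toNat with hj
  have : j = k := by
    rcases lt_trichotomy j k with h | h | h
    · exact absurd hj1 (h2 j h)
    · exact h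
    · exact absurd h1 (hj2 k h)
  omega

lemma find_first_nl {l : List Char} (t : List Char) (hl : '\n' ∉ l) :
    PySem.Chars.find (l ++ '\n' :: t) ['\n'] = (l.length : Int) := by
  apply find_eq_of_first
  · rw [List.drop_left]
    exact ⟨t, rfl⟩
  · intro i hi
    exact not_prefix_nl_drop hl hi [] t

lemma prefix_append_nl {P l : List Char} (t : List Char) (hP : '\n' ∉ P) :
    P <+: (l ++ '\n' :: t) ↔ P <+: l := by
  constructor
  · intro h
    by_cases hlen : P.length ≤ l.length
    · rw [List.prefix_iff_eq_take] at h ⊢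
      rwa [List.take_append_of_le_length hlen] at h
    · exfalso
      have hlen' : l.length < P.length := Nat.lt_of_not_le hlen
      obtain ⟨r, hr⟩ := h
      have hget : P[l.length]'hlen' = '\n' := by
        have : (P ++ r)[l.length]'(by rw [hr]; simp) = '\n' := by
          simp only [hr]
          rw [List.getElem_append_right (le_refl l.length)]
          simp
        rwa [List.getElem_append_left hlen'] at this
      exact hP (hget ▸ List.getElem_mem hlen')
  · intro h
    exact h.trans (List.prefix_append l ('\n' :: t))

lemma drop_big {l t : List Char} {j : Nat} (hj : l.length + 1 ≤ j) :
    List.drop j (l ++ '\n' :: t) = List.drop (j - (l.length + 1)) t := by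
  have h : l ++ '\n' :: t = (l ++ ['\n']) ++ t := by simp
  rw [h, List.drop_append, List.drop_of_length_le (by simp; omega)]
  simp only [List.nil_append, List.length_append, List.length_cons, List.length_nil]

lemma find_pattern {l : List Char} (t P : List Char) (hl : '\n' ∉ l) :
    PySem.Chars.find (l ++ '\n' :: t) ('\n' :: P)
      = if P <+: t then (l.length : Int)
        else if PySem.Chars.find t ('\n' :: P) = -1 then -1
        else (l.length : Int) + 1 + PySem.Chars.find t ('\n' :: P) := by
  split_ifs with h1 h2
  · apply find_eq_of_first
    · rw [List.drop_left]
      exact List.cons_prefix_cons.mpr ⟨rfl, h1⟩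
    · intro i hi
      exact not_prefix_nl_drop hl hi P t
  · rw [PySem.Chars.find_eq_neg_one_iff] at h2 ⊢
    intro hin
    obtain ⟨j, hj⟩ := (PySem.Chars.exists_prefix_drop_iff_isIn ('\n' :: P) _).mpr
      ((PySem.Chars.isIn_iff_infix ('\n' :: P) _).mpr hin)
    rcases lt_trichotomy j l.length with hcase | hcase | hcase
    · exact not_prefix_nl_drop hl hcase P t hj
    · subst hcase
      rw [List.drop_left] at hj
      exact h1 (List.cons_prefix_cons.mp hj).2
    · have hj' : ('\n' :: P) <+: List.drop (j - (l.length + 1)) t := by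
        rwa [drop_big (by omega)] at hj
      exact h2 ((PySem.Chars.isIn_iff_infix _ _).mp
        ((PySem.Chars.exists_prefix_drop_iff_isIn _ _).mp ⟨_, hj'⟩))
  · have hnn : 0 ≤ PySem.Chars.find t ('\n' :: P) := by
      rcases PySem.Chars.neg_one_le_find t ('\n' :: P) |>.lt_or_eq with h | h
      · omega
      · exact absurd h.symm h2
    obtain ⟨hq1, hq2⟩ := PySem.Chars.find_spec hnn
    set q := (PySem.Chars.find t ('\n' :: P)).toNat with hq
    have : PySem.Chars.find (l ++ '\n' :: t) ('\n' :: P) = ((l.length + 1 + q : Nat) : Int) := by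
      apply find_eq_of_first
      · rw [drop_big (by omega)]
        simpa using hq1
      · intro i hi
        rcases lt_trichotomy i l.length with hcase | hcase | hcase
        · exact not_prefix_nl_drop hl hcase P t
        · subst hcase
          rw [List.drop_left]
          intro hpre
          exact h1 (List.cons_prefix_cons.mp hpre).2
        · intro hpre
          rw [drop_big (by omega)] at hpre
          exact hq2 (i - (l.length + 1)) (by omega) hpre
    rw [this]
    push_cast
    omega

lemma replaceFirst_ne_nil (new : List Char) {ls : List (List Char)} (h : ls ≠ []) :
    pvReplaceFirst new ls ≠ [] := by
  cases ls with
  | nil => exact absurd rfl h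
  | cons x xs => unfold pvReplaceFirst; split_ifs <;> simp

lemma spliceB_shift (l t new : List Char) (st : Nat) (hst : st ≤ t.length) :
    pvSpliceB (l ++ '\n' :: t) new ((l.length : Int) + 1 + (st : Int))
      = l ++ '\n' :: pvSpliceB t new (st : Int) := by
  simp only [pvSpliceB]
  have hcast : (l.length : Int) + 1 + (st : Int) = ((l.length + 1 + st : Nat) : Int) := by
    push_cast; omega
  rw [hcast, PySem.Chars.findFrom_natCast _ ['\n'] (l.length + 1 + st) (by simp; omega),
    PySem.Chars.findFrom_natCast t ['\n'] st hst]
  have hdrop : List.drop (l.length + 1 + st) (l ++ '\n' :: t) = List.drop st t := by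
    rw [drop_big (by omega)]; congr 1; omega
  rw [hdrop]
  have htake : PySem.Chars.slice (l ++ '\n' :: t) none (some ((l.length + 1 + st : Nat) : Int))
      = l ++ '\n' :: List.take st t := by
    rw [PySem.Chars.slice_eq_listSlice, PySem.List.slice_to _ (by positivity)]
    rw [Int.toNat_natCast, List.take_append, List.take_of_length_le (by omega)]
    congr 1
    have : l.length + 1 + st - l.length = st + 1 := by omega
    rw [this, List.take_succ_cons]
  have httake : PySem.Chars.slice t none (some ((st : Nat) : Int)) = List.take st t := by
    rw [PySem.Chars.slice_eq_listSlice, PySem.List.slice_to _ (by positivity), Int.toNat_natCast]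
  by_cases hfind : PySem.Chars.find (List.drop st t) ['\n'] = -1
  · simp only [hfind, reduceIte]
    have hs1 : PySem.Chars.slice (l ++ '\n' :: t) (some ((l ++ '\n' :: t).length : Int)) none
        = ([] : List Char) := by
      rw [PySem.Chars.slice_eq_listSlice, PySem.List.slice_from _ (by positivity),
        Int.toNat_natCast, List.drop_of_length_le le_rfl]
    have hs2 : PySem.Chars.slice t (some (t.length : Int)) none = ([] : List Char) := by
      rw [PySem.Chars.slice_eq_listSlice, PySem.List.slice_from _ (by positivity),
        Int.toNat_natCast, List.drop_of_length_le le_rfl]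
    rw [hs1, hs2, htake, httake]
    simp
  · have hnn : 0 ≤ PySem.Chars.find (List.drop st t) ['\n'] := by
      rcases (PySem.Chars.neg_one_le_find (List.drop st t) ['\n']).lt_or_eq with h | h
      · omega
      · exact absurd h.symm hfind
    set q := PySem.Chars.find (List.drop st t) ['\n'] with hq
    simp only [if_neg hfind]
    rw [if_neg (show ¬ (((l.length + 1 + st : Nat) : Int) + q = -1) by omega),
      if_neg (show ¬ (((st : Nat) : Int) + q = -1) by omega)]
    have hq' : ((l.length + 1 + st : Nat) : Int) + q = ((l.length + 1 + st + q.toNat : Nat) : Int) := by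
      push_cast; omega
    have hq'' : ((st : Nat) : Int) + q = ((st + q.toNat : Nat) : Int) := by push_cast; omega
    have hs1 : PySem.Chars.slice (l ++ '\n' :: t) (some (((l.length + 1 + st : Nat) : Int) + q)) none
        = List.drop (st + q.toNat) t := by
      rw [hq', PySem.Chars.slice_eq_listSlice, PySem.List.slice_from _ (by positivity),
        Int.toNat_natCast, drop_big (by omega)]
      congr 1; omega
    have hs2 : PySem.Chars.slice t (some (((st : Nat) : Int) + q)) none = List.drop (st + q.toNat) t := by
      rw [hq'', PySem.Chars.slice_eq_listSlice, PySem.List.slice_from _ (by positivity),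
        Int.toNat_natCast]
    rw [hs1, hs2, htake, httake]
    simp

lemma marker_eq : pvMarkerB = pvMarkerA := rfl

lemma bcore_no_nl (s new : List Char) (h : '\n' ∉ s) :
    pvBcore s new = PySem.Chars.join ['\n'] (pvReplaceFirst new (pvLines s)) := by
  rw [pvLines_no_nl h]
  simp only [pvBcore, pvReplaceFirst]
  rw [marker_eq]
  by_cases hs : PySem.Chars.startswith s pvMarkerA = true
  · rw [if_pos hs, if_pos hs, PySem.Chars.join_singleton]
    simp only [pvSpliceB]
    rw [marker_eq, PySem.Chars.findFrom_zero, find_no_nl h, if_pos rfl]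
    have h1 : PySem.Chars.slice s none (some 0) = ([] : List Char) := by
      rw [PySem.Chars.slice_eq_listSlice, PySem.List.slice_to _ le_rfl]; simp
    have h2 : PySem.Chars.slice s (some (s.length : Int)) none = ([] : List Char) := by
      rw [PySem.Chars.slice_eq_listSlice, PySem.List.slice_from _ (by positivity),
        Int.toNat_natCast, List.drop_of_length_le le_rfl]
    rw [h1, h2]
    simp
  · rw [if_neg hs, if_neg hs]
    have hfind : PySem.Chars.find s ('\n' :: pvMarkerA) = -1 := by
      rw [PySem.Chars.find_eq_neg_one_iff]
      intro hin
      exact h (hin.subset (List.mem_cons_self))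
    rw [hfind, if_pos rfl, PySem.Chars.join_singleton]

lemma bcore_cons (l t new : List Char) (hl : '\n' ∉ l)
    (IH : pvBcore t new = PySem.Chars.join ['\n'] (pvReplaceFirst new (pvLines t))) :
    pvBcore (l ++ '\n' :: t) new
      = PySem.Chars.join ['\n'] (pvReplaceFirst new (pvLines (l ++ '\n' :: t))) := by
  rw [pvLines_append t hl]
  have hsw : PySem.Chars.startswith (l ++ '\n' :: t) pvMarkerA = PySem.Chars.startswith l pvMarkerA := by
    by_cases hp : pvMarkerA <+: l
    · rw [(PySem.Chars.startswith_iff _ _).mpr ((prefix_append_nl t pvMarker_no_nl).mpr hp),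
        (PySem.Chars.startswith_iff _ _).mpr hp]
    · have h1 : ¬ PySem.Chars.startswith (l ++ '\n' :: t) pvMarkerA = true := fun hh =>
        hp ((prefix_append_nl t pvMarker_no_nl).mp ((PySem.Chars.startswith_iff _ _).mp hh))
      have h2 : ¬ PySem.Chars.startswith l pvMarkerA = true := fun hh =>
        hp ((PySem.Chars.startswith_iff _ _).mp hh)
      simp [h1, h2]
  simp only [pvBcore, pvReplaceFirst]
  rw [marker_eq, hsw]
  by_cases hP : PySem.Chars.startswith l pvMarkerA = true
  · rw [if_pos hP, if_pos hP, join_cons _ (pvLines_ne_nil t), join_pvLines]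
    simp only [pvSpliceB]
    rw [marker_eq, PySem.Chars.findFrom_zero, find_first_nl t hl, if_neg (by omega)]
    have h1 : PySem.Chars.slice (l ++ '\n' :: t) none (some 0) = ([] : List Char) := by
      rw [PySem.Chars.slice_eq_listSlice, PySem.List.slice_to _ le_rfl]; simp
    have h2 : PySem.Chars.slice (l ++ '\n' :: t) (some (l.length : Int)) none = '\n' :: t := by
      rw [PySem.Chars.slice_eq_listSlice, PySem.List.slice_from _ (by positivity),
        Int.toNat_natCast, List.drop_left]
    rw [h1, h2]
    simp
  · rw [if_neg hP, if_neg hP,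
      join_cons _ (replaceFirst_ne_nil new (pvLines_ne_nil t)), ← IH]
    have hPt' := find_pattern t pvMarkerA hl
    simp only [pvBcore]
    rw [marker_eq]
    by_cases hPt : pvMarkerA <+: t
    · rw [if_pos hPt] at hPt'
      rw [hPt', if_neg (by omega), if_pos ((PySem.Chars.startswith_iff _ _).mpr hPt)]
      have : (l.length : Int) + 1 = (l.length : Int) + 1 + ((0 : Nat) : Int) := by simp
      rw [this, spliceB_shift l t new 0 (by omega)]
      rfl
    · rw [if_neg hPt] at hPt'
      rw [if_neg (fun hh => hPt ((PySem.Chars.startswith_iff _ _).mp hh))]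
      by_cases hq : PySem.Chars.find t ('\n' :: pvMarkerA) = -1
      · rw [if_pos hq] at hPt'
        rw [hPt', if_pos rfl, if_pos hq]
      · rw [if_neg hq] at hPt'
        have hnn : 0 ≤ PySem.Chars.find t ('\n' :: pvMarkerA) := by
          rcases (PySem.Chars.neg_one_le_find t ('\n' :: pvMarkerA)).lt_or_eq with h | h
          · omega
          · exact absurd h.symm hq
        set q := PySem.Chars.find t ('\n' :: pvMarkerA) with hqdef
        rw [hPt', if_neg (by omega), if_neg hq]
        have hqlen : q.toNat < t.length := by
          obtain ⟨hq1, -⟩ := PySem.Chars.find_spec hnn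
          obtain ⟨r, hr⟩ := hq1
          have := congrArg List.length hr
          simp [List.length_drop] at this
          omega
        have hc1 : (l.length : Int) + 1 + q + 1 = (l.length : Int) + 1 + ((q.toNat + 1 : Nat) : Int) := by
          push_cast; omega
        have hc2 : q + 1 = ((q.toNat + 1 : Nat) : Int) := by push_cast; omega
        rw [hc1, hc2, spliceB_shift l t new (q.toNat + 1) (by omega)]

lemma bcore_eq (n : Nat) : ∀ (s : List Char), s.length ≤ n → ∀ new,
    pvBcore s new = PySem.Chars.join ['\n'] (pvReplaceFirst new (pvLines s)) := by
  induction n with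
  | zero =>
    intro s hs new
    have : s = [] := List.eq_nil_of_length_eq_zero (Nat.le_zero.mp hs)
    subst this
    exact bcore_no_nl [] new (by simp)
  | succ n ih =>
    intro s hs new
    by_cases hmem : '\n' ∈ s
    · obtain ⟨l, t, rfl, hl⟩ := exists_first_split hmem
      have hlen : t.length ≤ n := by
        have := hs; simp [List.length_append] at this; omega
      exact bcore_cons l t new hl (ih t hlen new)
    · exact bcore_no_nl s new hmem

lemma alt_eq_bcore (reason new_reason : String) :
    edit_warning_reason_alt reason new_reason
      = String.ofList (pvBcore reason.toList new_reason.toList) := by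
  simp only [edit_warning_reason_alt, pvBcore]
  split_ifs <;> simp [String.ofList_toList]

-- ===== VERDICT (by name: the statement is the Claim_ definition above) =====
theorem edit_warning_reason_spec : Claim_equal_edit_warning_reason := by
  intro reason new_reason _
  unfold Spec_edit_warning_reason
  rw [alt_eq_bcore, bcore_eq reason.toList.length reason.toList le_rfl,
    edit_warning_reason, splitOn_eq_pvLines]
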